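-- pv_equiv track=rewrite | github.com/mazalkov/CodeSignal | Code Arcade/Intro/Level 2/almostIncreasingSequence.py | solution
-- ===== SOURCE A (Python) =====
-- def solution(sequence):
--
--     flag = False
--     idx = 0
--
--     for i in range(len(sequence)-1):
--         if sequence[i] >= sequence[i+1]:
--             if flag:
--                 return False
--
--             flag = True
--             idx = i
--
--
--     if flag:
--         check = (idx == 0) or (idx+1 == len(sequence)-1) or (sequence[idx-1] < sequence[idx+1]) or (sequence[idx] < sequence[idx+2])
--
--         return check
--
--
--     return True
-- ===== SOURCE B (Python) =====
-- def solution(sequence):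
--     def increasing(s):
--         return all(s[k] < s[k + 1] for k in range(len(s) - 1))
--     if increasing(sequence):
--         return True
--     for i in range(len(sequence)):
--         if increasing(sequence[:i] + sequence[i + 1:]):
--             return True
--     return False
-- ===== Notes on version B (the rewrite author's own statement) =====
-- stated objective: simpler
-- what changed: Replaced A's single-pass flag/idx violation bookkeeping and its four-way boundary check by a plain brute force: test whether the sequence itself, or the sequence with any one element removed, is strictly increasing.
import Mathlib
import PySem

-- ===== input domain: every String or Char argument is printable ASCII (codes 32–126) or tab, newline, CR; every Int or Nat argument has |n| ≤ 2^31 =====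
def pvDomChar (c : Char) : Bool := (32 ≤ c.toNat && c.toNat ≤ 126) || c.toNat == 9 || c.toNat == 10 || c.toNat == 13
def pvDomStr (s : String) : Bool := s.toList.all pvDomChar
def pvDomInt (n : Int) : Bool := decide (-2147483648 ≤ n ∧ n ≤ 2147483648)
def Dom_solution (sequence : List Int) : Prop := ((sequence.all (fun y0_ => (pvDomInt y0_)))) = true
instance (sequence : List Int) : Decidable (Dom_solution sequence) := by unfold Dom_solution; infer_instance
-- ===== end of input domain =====

-- B replaces A's single-pass positional violation check by a brute-force test of all
-- one-element removals (objective: simpler; not faster — A is O(n), B is O(n^2)).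

-- ===== PORT A =====
-- A's for-loop with early `return False`: state (flag, idx); `none` = early return False.
-- Indices produced by range(len-1) are always in range, so pyGetD's default is never read.
def solutionLoop (s : List Int) : List Int → Bool → Int → Option (Bool × Int)
  | [], flag, idx => some (flag, idx)
  | i :: rest, flag, idx =>
    if PySem.List.pyGetD s i 0 ≥ PySem.List.pyGetD s (i + 1) 0 then
      if flag then none
      else solutionLoop s rest true i
    else solutionLoop s rest flag idx

def solution (sequence : List Int) : Bool :=
  match solutionLoop sequence (PySem.List.pyRange 0 ((sequence.length : Int) - 1) 1) false 0 with
  | none => false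
  | some (flag, idx) =>
    if flag then
      decide (idx = 0) || decide (idx + 1 = (sequence.length : Int) - 1)
        || decide (PySem.List.pyGetD sequence (idx - 1) 0 < PySem.List.pyGetD sequence (idx + 1) 0)
        || decide (PySem.List.pyGetD sequence idx 0 < PySem.List.pyGetD sequence (idx + 2) 0)
    else true

-- ===== PORT B =====
-- helper `increasing(s)`: all consecutive pairs strictly increase
def increasing_alt (s : List Int) : Bool :=
  (PySem.List.pyRange 0 ((s.length : Int) - 1) 1).all
    (fun k => decide (PySem.List.pyGetD s k 0 < PySem.List.pyGetD s (k + 1) 0))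

def solution_alt (sequence : List Int) : Bool :=
  if increasing_alt sequence then true
  else
    (PySem.List.pyRange 0 (sequence.length : Int) 1).any
      (fun i => increasing_alt
        (PySem.List.slice sequence none (some i) ++ PySem.List.slice sequence (some (i + 1)) none))

-- ===== PRECONDITION & SPEC =====
def Spec_solution (sequence : List Int) (out : Bool) : Prop := out = solution_alt sequence
instance (sequence : List Int) (out : Bool) : Decidable (Spec_solution sequence out) := by unfold Spec_solution; infer_instance

-- ===== CLAIM (what is proved, stated in full; the proofs are below) =====
def Claim_equal_solution : Prop := ∀ (sequence : List Int), Dom_solution sequence → Spec_solution sequence (solution sequence)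

-- ===== LEMMAS AND PROOFS =====

-- the list with element k removed, as B builds it
def remAt (s : List Int) (k : Nat) : List Int := s.take k ++ s.drop (k + 1)

-- strictly increasing, over getD pairs
def IncP (s : List Int) : Prop := ∀ m : Nat, m + 1 < s.length → s.getD m 0 < s.getD (m + 1) 0

-- the violation indices A's loop scans for
def violList (s : List Int) : List Nat :=
  (List.range (s.length - 1)).filter (fun j => decide (s.getD (j + 1) 0 ≤ s.getD j 0))

-- A's final check expression at idx = j
def checkB (s : List Int) (j : Nat) : Bool :=
  decide ((j : Int) = 0) || decide ((j : Int) + 1 = (s.length : Int) - 1)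
    || decide (PySem.List.pyGetD s ((j : Int) - 1) 0 < PySem.List.pyGetD s ((j : Int) + 1) 0)
    || decide (PySem.List.pyGetD s ((j : Int)) 0 < PySem.List.pyGetD s ((j : Int) + 2) 0)

theorem loop_true (s : List Int) (l : List Nat) (idx : Int) :
    solutionLoop s (l.map (fun k : Nat => (k : Int))) true idx =
      if l.filter (fun j => decide (s.getD (j + 1) 0 ≤ s.getD j 0)) = [] then some (true, idx)
      else none := by
  induction l generalizing idx with
  | nil => simp [solutionLoop]
  | cons j rest ih =>
    have e1 : PySem.List.pyGetD s ((j : Int)) 0 = s.getD j 0 := by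
      rw [PySem.List.pyGetD_natCast]
    have e2 : PySem.List.pyGetD s ((j : Int) + 1) 0 = s.getD (j + 1) 0 := by
      rw [show ((j : Int) + 1) = ((j + 1 : Nat) : Int) by push_cast; ring,
        PySem.List.pyGetD_natCast]
    rw [List.map_cons, solutionLoop, e1, e2, List.filter_cons]
    by_cases h : s.getD (j + 1) 0 ≤ s.getD j 0
    · have hd : decide (s.getD (j + 1) 0 ≤ s.getD j 0) = true := decide_eq_true h
      have h' : s.getD j 0 ≥ s.getD (j + 1) 0 := h
      rw [if_pos h', if_pos rfl, if_neg (by simp only [hd]; simp)]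
    · have hd : decide (s.getD (j + 1) 0 ≤ s.getD j 0) = false := decide_eq_false h
      have h' : ¬ s.getD j 0 ≥ s.getD (j + 1) 0 := h
      rw [if_neg h', ih]
      simp only [hd, Bool.false_eq_true, if_false]

theorem loop_false (s : List Int) (l : List Nat) (idx0 : Int) :
    solutionLoop s (l.map (fun k : Nat => (k : Int))) false idx0 =
      match l.filter (fun j => decide (s.getD (j + 1) 0 ≤ s.getD j 0)) with
      | [] => some (false, idx0)
      | [j] => some (true, (j : Int))
      | _ :: _ :: _ => none := by
  induction l generalizing idx0 with
  | nil => simp [solutionLoop]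
  | cons j rest ih =>
    have e1 : PySem.List.pyGetD s ((j : Int)) 0 = s.getD j 0 := by
      rw [PySem.List.pyGetD_natCast]
    have e2 : PySem.List.pyGetD s ((j : Int) + 1) 0 = s.getD (j + 1) 0 := by
      rw [show ((j : Int) + 1) = ((j + 1 : Nat) : Int) by push_cast; ring,
        PySem.List.pyGetD_natCast]
    rw [List.map_cons, solutionLoop, e1, e2, List.filter_cons]
    by_cases h : s.getD (j + 1) 0 ≤ s.getD j 0
    · have hd : decide (s.getD (j + 1) 0 ≤ s.getD j 0) = true := decide_eq_true h
      have h' : s.getD j 0 ≥ s.getD (j + 1) 0 := h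
      rw [if_pos h', if_neg (by simp), loop_true]
      simp only [hd, if_true]
      rcases hf : rest.filter (fun j => decide (s.getD (j + 1) 0 ≤ s.getD j 0)) with _ | ⟨x, xs⟩
      · rw [if_pos rfl]
      · rw [if_neg (by simp)]
    · have hd : decide (s.getD (j + 1) 0 ≤ s.getD j 0) = false := decide_eq_false h
      have h' : ¬ s.getD j 0 ≥ s.getD (j + 1) 0 := h
      rw [if_neg h', ih]
      simp only [hd, Bool.false_eq_true, if_false]

theorem solution_eq (s : List Int) :
    solution s = match violList s with
      | [] => true
      | [j] => checkB s j
      | _ :: _ :: _ => false := by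
  unfold solution
  rw [PySem.List.pyRange_one,
    show (((s.length : Int) - 1) - 0).toNat = s.length - 1 by omega,
    show (List.range (s.length - 1)).map (fun k : Nat => (0 : Int) + (k : Int))
        = (List.range (s.length - 1)).map (fun k : Nat => (k : Int)) by simp,
    loop_false]
  rcases hf : (List.range (s.length - 1)).filter (fun j => decide (s.getD (j + 1) 0 ≤ s.getD j 0))
    with _ | ⟨j, _ | ⟨j2, rest⟩⟩
  · rw [show violList s = [] from hf]
    rfl
  · rw [show violList s = [j] from hf]
    rfl
  · rw [show violList s = j :: j2 :: rest from hf]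

theorem alt_inc_iff (s : List Int) : increasing_alt s = true ↔ IncP s := by
  unfold increasing_alt IncP
  rw [PySem.List.pyRange_one]
  have h1 : (((s.length : Int) - 1) - 0).toNat = s.length - 1 := by omega
  rw [h1, List.all_map]
  simp only [List.all_eq_true, List.mem_range, Function.comp, decide_eq_true_eq]
  have key : ∀ m : Nat,
      (PySem.List.pyGetD s ((0 : Int) + (m : Int)) 0 < PySem.List.pyGetD s ((0 : Int) + (m : Int) + 1) 0
        ↔ s.getD m 0 < s.getD (m + 1) 0) := by
    intro m
    rw [show ((0 : Int) + (m : Int)) = ((m : Nat) : Int) by ring,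
      show (((m : Nat) : Int) + 1) = ((m + 1 : Nat) : Int) by push_cast; ring,
      PySem.List.pyGetD_natCast, PySem.List.pyGetD_natCast]
  constructor
  · intro h m hm
    exact (key m).mp (h m (by omega))
  · intro h m hm
    exact (key m).mpr (h m (by omega))

theorem alt_eq (s : List Int) :
    solution_alt s = (increasing_alt s || (List.range s.length).any (fun k => increasing_alt (remAt s k))) := by
  unfold solution_alt
  have hbody : ∀ k : Nat,
      increasing_alt (PySem.List.slice s none (some ((0 : Int) + (k : Int)))
          ++ PySem.List.slice s (some (((0 : Int) + (k : Int)) + 1)) none)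
        = increasing_alt (remAt s k) := by
    intro k
    rw [show ((0 : Int) + (k : Int)) = ((k : Nat) : Int) by ring,
      PySem.List.slice_to_natCast,
      show (((k : Nat) : Int) + 1) = ((k + 1 : Nat) : Int) by push_cast; ring,
      PySem.List.slice_from_natCast]
    rfl
  rw [PySem.List.pyRange_one,
    show (((s.length : Int)) - 0).toNat = s.length by omega,
    List.any_map]
  have hfun : ((fun i => increasing_alt (PySem.List.slice s none (some i)
        ++ PySem.List.slice s (some (i + 1)) none)) ∘ (fun k : Nat => (0 : Int) + (k : Int)))
      = (fun k : Nat => increasing_alt (remAt s k)) := by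
    funext k
    exact hbody k
  rw [hfun]
  by_cases hi : increasing_alt s
  · simp [hi]
  · simp [hi]

theorem remAt_length (s : List Int) (i : Nat) (h : i < s.length) :
    (remAt s i).length = s.length - 1 := by
  simp [remAt]; omega

theorem remAt_getD (s : List Int) (i k : Nat) (h : i < s.length) :
    (remAt s i).getD k 0 = if k < i then s.getD k 0 else s.getD (k + 1) 0 := by
  unfold remAt
  by_cases hk : k < i
  · rw [if_pos hk, List.getD_eq_getElem?_getD,
      List.getElem?_append_left (by rw [List.length_take]; omega),
      List.getElem?_take_of_lt hk, List.getD_eq_getElem?_getD]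
  · rw [if_neg hk, List.getD_eq_getElem?_getD,
      List.getElem?_append_right (by rw [List.length_take]; omega),
      List.getElem?_drop, List.getD_eq_getElem?_getD, List.length_take]
    congr 2
    omega

-- a violation at j survives any removal not at j or j+1
theorem not_inc_of_vio (s : List Int) (j k : Nat) (hj : j + 1 < s.length)
    (hv : s.getD (j + 1) 0 ≤ s.getD j 0) (hk : k < s.length)
    (h1 : k ≠ j) (h2 : k ≠ j + 1) : ¬ IncP (remAt s k) := by
  intro hInc
  have hl : (remAt s k).length = s.length - 1 := remAt_length s k hk
  by_cases hkj : k < j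
  · have := hInc (j - 1) (by omega)
    rw [remAt_getD s k (j - 1) hk, remAt_getD s k ((j - 1) + 1) hk,
      if_neg (by omega), if_neg (by omega),
      show (j - 1) + 1 = j by omega] at this
    exact absurd this (not_lt.mpr hv)
  · have hk2 : j + 1 < k := by omega
    have := hInc j (by omega)
    rw [remAt_getD s k j hk, remAt_getD s k (j + 1) hk,
      if_pos (by omega), if_pos (by omega)] at this
    exact absurd this (not_lt.mpr hv)

-- adjacent violations at j and j+1: removing j+1 still leaves s[j] ≥ s[j+2]
theorem not_inc_adj (s : List Int) (j : Nat) (hj : j + 2 < s.length)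
    (hv1 : s.getD (j + 1) 0 ≤ s.getD j 0) (hv2 : s.getD (j + 2) 0 ≤ s.getD (j + 1) 0) :
    ¬ IncP (remAt s (j + 1)) := by
  intro hInc
  have hl : (remAt s (j + 1)).length = s.length - 1 := remAt_length s (j + 1) (by omega)
  have := hInc j (by omega)
  rw [remAt_getD s (j + 1) j (by omega), remAt_getD s (j + 1) (j + 1) (by omega),
    if_pos (by omega), if_neg (by omega),
    show j + 1 + 1 = j + 2 by omega] at this
  have : s.getD (j + 2) 0 < s.getD (j + 2) 0 := lt_of_le_of_lt (le_trans hv2 hv1) this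
  exact absurd this (lt_irrefl _)

theorem mem_violList (s : List Int) (j : Nat) :
    j ∈ violList s ↔ j + 1 < s.length ∧ s.getD (j + 1) 0 ≤ s.getD j 0 := by
  simp [violList, List.mem_filter]; omega

theorem violList_pairwise (s : List Int) : (violList s).Pairwise (· < ·) := by
  exact List.Pairwise.sublist List.filter_sublist List.pairwise_lt_range

-- single violation at j: removing j works iff j = 0 or s[j-1] < s[j+1]
theorem inc_rem_j (s : List Int) (j : Nat) (hj : j + 1 < s.length)
    (hone : ∀ m, m + 1 < s.length → m ≠ j → s.getD m 0 < s.getD (m + 1) 0)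
    (h : j = 0 ∨ s.getD (j - 1) 0 < s.getD (j + 1) 0) : IncP (remAt s j) := by
  intro m hm
  rw [remAt_length s j (by omega)] at hm
  rw [remAt_getD s j m (by omega), remAt_getD s j (m + 1) (by omega)]
  by_cases h1 : m + 1 < j
  · rw [if_pos (by omega), if_pos h1]
    exact hone m (by omega) (by omega)
  · by_cases h2 : m < j
    · rw [if_pos h2, if_neg (by omega)]
      have hlt := h.resolve_left (by omega)
      rw [show m = j - 1 by omega, show j - 1 + 1 + 1 = j + 1 by omega]
      exact hlt
    · rw [if_neg (by omega), if_neg (by omega)]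
      exact hone (m + 1) (by omega) (by omega)

theorem inc_rem_j1 (s : List Int) (j : Nat) (hj : j + 1 < s.length)
    (hone : ∀ m, m + 1 < s.length → m ≠ j → s.getD m 0 < s.getD (m + 1) 0)
    (h : j + 2 = s.length ∨ s.getD j 0 < s.getD (j + 2) 0) : IncP (remAt s (j + 1)) := by
  intro m hm
  rw [remAt_length s (j + 1) (by omega)] at hm
  rw [remAt_getD s (j + 1) m (by omega), remAt_getD s (j + 1) (m + 1) (by omega)]
  by_cases h1 : m + 1 < j + 1
  · rw [if_pos (by omega), if_pos h1]
    exact hone m (by omega) (by omega)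
  · by_cases h2 : m < j + 1
    · rw [if_pos h2, if_neg (by omega)]
      have hlt := h.resolve_left (by omega)
      rw [show m = j by omega, show j + 1 + 1 = j + 2 by omega]
      exact hlt
    · rw [if_neg (by omega), if_neg (by omega)]
      exact hone (m + 1) (by omega) (by omega)

theorem not_inc_rem_j (s : List Int) (j : Nat) (hj : j + 1 < s.length) (hj0 : j ≠ 0)
    (h : s.getD (j + 1) 0 ≤ s.getD (j - 1) 0) : ¬ IncP (remAt s j) := by
  intro hInc
  have := hInc (j - 1) (by rw [remAt_length s j (by omega)]; omega)
  rw [remAt_getD s j (j - 1) (by omega), remAt_getD s j ((j - 1) + 1) (by omega),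
    if_pos (by omega), if_neg (by omega),
    show (j - 1) + 1 + 1 = j + 1 by omega] at this
  exact absurd this (not_lt.mpr h)

theorem not_inc_rem_j1 (s : List Int) (j : Nat) (hj : j + 2 < s.length)
    (h : s.getD (j + 2) 0 ≤ s.getD j 0) : ¬ IncP (remAt s (j + 1)) := by
  intro hInc
  have := hInc j (by rw [remAt_length s (j + 1) (by omega)]; omega)
  rw [remAt_getD s (j + 1) j (by omega), remAt_getD s (j + 1) (j + 1) (by omega),
    if_pos (by omega), if_neg (by omega),
    show j + 1 + 1 = j + 2 by omega] at this
  exact absurd this (not_lt.mpr h)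

-- characterization of A's final check as a Nat-indexed proposition
theorem checkB_iff (s : List Int) (j : Nat) :
    checkB s j = true ↔ (j = 0 ∨ j + 2 = s.length ∨ s.getD (j - 1) 0 < s.getD (j + 1) 0
      ∨ s.getD j 0 < s.getD (j + 2) 0) := by
  by_cases hj0 : j = 0
  · subst hj0
    unfold checkB
    simp
  · unfold checkB
    rw [show ((j : Int) - 1) = ((j - 1 : Nat) : Int) by omega, PySem.List.pyGetD_natCast,
      show ((j : Int) + 1) = ((j + 1 : Nat) : Int) by push_cast; ring, PySem.List.pyGetD_natCast,
      PySem.List.pyGetD_natCast,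
      show ((j : Int) + 2) = ((j + 2 : Nat) : Int) by push_cast; ring, PySem.List.pyGetD_natCast]
    simp only [Bool.or_eq_true, decide_eq_true_eq]
    constructor
    · rintro (((h | h) | h) | h)
      · exact absurd (by omega : j = 0) hj0
      · exact Or.inr (Or.inl (by omega))
      · exact Or.inr (Or.inr (Or.inl h))
      · exact Or.inr (Or.inr (Or.inr h))
    · rintro (h | h | h | h)
      · exact absurd h hj0
      · exact Or.inl (Or.inl (Or.inr (by omega)))
      · exact Or.inl (Or.inr h)
      · exact Or.inr h

-- ===== VERDICT (by name: the statement is the Claim_ definition above) =====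
theorem solution_spec_main (s : List Int) : solution s = solution_alt s := by
  rw [solution_eq, alt_eq]
  rcases hF : violList s with _ | ⟨j, _ | ⟨j2, rest⟩⟩
  · have hinc : IncP s := by
      intro m hm
      by_contra hc
      have hmem : m ∈ violList s := (mem_violList s m).mpr ⟨hm, by omega⟩
      rw [hF] at hmem
      simp at hmem
    rw [(alt_inc_iff s).mpr hinc]
    rfl
  · have hjmem : j ∈ violList s := by rw [hF]; exact List.mem_singleton_self j
    obtain ⟨hjb, hjv⟩ := (mem_violList s j).mp hjmem
    have hone : ∀ m, m + 1 < s.length → m ≠ j → s.getD m 0 < s.getD (m + 1) 0 := by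
      intro m hm hne
      by_contra hc
      have hmem : m ∈ violList s := (mem_violList s m).mpr ⟨hm, by omega⟩
      rw [hF] at hmem
      simp at hmem
      exact hne hmem
    have hincF : increasing_alt s = false := by
      have hni : ¬ IncP s := fun hI => absurd (hI j hjb) (by omega)
      exact Bool.eq_false_iff.mpr (fun ht => hni ((alt_inc_iff s).mp ht))
    rw [hincF, Bool.false_or, Bool.eq_iff_iff]
    simp only [List.any_eq_true, List.mem_range, alt_inc_iff]
    constructor
    · intro hc
      rcases (checkB_iff s j).mp hc with h | h | h | h
      · exact ⟨j, by omega, inc_rem_j s j hjb hone (Or.inl h)⟩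
      · exact ⟨j + 1, by omega, inc_rem_j1 s j hjb hone (Or.inl h)⟩
      · exact ⟨j, by omega, inc_rem_j s j hjb hone (Or.inr h)⟩
      · exact ⟨j + 1, by omega, inc_rem_j1 s j hjb hone (Or.inr h)⟩
    · rintro ⟨k, hk, hI⟩
      by_contra hc
      have hnp : ¬ (j = 0 ∨ j + 2 = s.length ∨ s.getD (j - 1) 0 < s.getD (j + 1) 0
          ∨ s.getD j 0 < s.getD (j + 2) 0) := fun hp => hc ((checkB_iff s j).mpr hp)
      push Not at hnp
      obtain ⟨h1, h2, h3, h4⟩ := hnp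
      by_cases hkj : k = j
      · rw [hkj] at hI
        exact not_inc_rem_j s j hjb h1 h3 hI
      · by_cases hkj1 : k = j + 1
        · rw [hkj1] at hI
          exact not_inc_rem_j1 s j (by omega) h4 hI
        · exact not_inc_of_vio s j k hjb hjv hk hkj hkj1 hI
  · have hjmem : j ∈ violList s := by rw [hF]; exact List.mem_cons_self
    have hj2mem : j2 ∈ violList s := by rw [hF]; simp
    obtain ⟨hjb, hjv⟩ := (mem_violList s j).mp hjmem
    obtain ⟨hj2b, hj2v⟩ := (mem_violList s j2).mp hj2mem
    have hlt : j < j2 := by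
      have hp := violList_pairwise s
      rw [hF] at hp
      exact (List.pairwise_cons.mp hp).1 j2 (by simp)
    have hincF : increasing_alt s = false := by
      have hni : ¬ IncP s := fun hI => absurd (hI j hjb) (by omega)
      exact Bool.eq_false_iff.mpr (fun ht => hni ((alt_inc_iff s).mp ht))
    rw [hincF, Bool.false_or]
    symm
    rw [List.any_eq_false]
    intro k hk
    rw [List.mem_range] at hk
    intro hkt
    have hI : IncP (remAt s k) := (alt_inc_iff _).mp hkt
    by_cases hA1 : k = j
    · -- removal at j: j2 ≠ j and j2 ≠ j + 1? may fail if j2 = j + 1... handle via the j2-violation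
      by_cases hA2 : j2 = j + 1
      · -- k = j < j+1 = j2 : violation j2 survives? k ≠ j2, k ≠ j2+1: k = j = j2 - 1 ✓
        exact not_inc_of_vio s j2 k hj2b hj2v hk (by omega) (by omega) hI
      · exact not_inc_of_vio s j2 k hj2b hj2v hk (by omega) (by omega) hI
    · by_cases hA2 : k = j + 1
      · by_cases hB : j2 = j + 1
        · -- adjacent violations, removing the middle element
          rw [hA2] at hI
          exact not_inc_adj s j (by omega) hjv (by rw [show j + 2 = j2 + 1 by omega, show j + 1 = j2 by omega]; exact hj2v) hI
        · exact not_inc_of_vio s j2 k hj2b hj2v hk (by omega) (by omega) hI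
      · exact not_inc_of_vio s j k hjb hjv hk hA1 hA2 hI

-- ===== VERDICT (by name: the statement is the Claim_ definition above) =====
theorem solution_spec : Claim_equal_solution := by
  intro s _hdom
  unfold Spec_solution
  exact solution_spec_main s
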